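-- pv_equiv track=rewrite | github.com/asdf27901/Interface-Custom-Composition | utils/dict_operate.py | get_model_dict
-- ===== SOURCE A (Python) =====
-- def get_model_dict(d: dict) -> dict:
--     pop = []
--     for key in d.keys():
--         if not d[key] and key in ['query', 'body', 'data']:
--             pop.append(key)
--
--     for i in pop:
--         d.pop(i)
--     return d
-- ===== SOURCE B (Python) =====
-- def get_model_dict(d: dict) -> dict:
--     for name in ('query', 'body', 'data'):
--         if name in d and not d[name]:
--             d.pop(name)
--     return d
-- ===== Notes on version B (the rewrite author's own statement) =====
-- stated objective: simpler
-- what changed: Instead of scanning every key of d to stage a pop-list and then popping in a second loop, B iterates over the three fixed names and conditionally pops each directly, removing the whole-dict scan and the staging list.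
import Mathlib
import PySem

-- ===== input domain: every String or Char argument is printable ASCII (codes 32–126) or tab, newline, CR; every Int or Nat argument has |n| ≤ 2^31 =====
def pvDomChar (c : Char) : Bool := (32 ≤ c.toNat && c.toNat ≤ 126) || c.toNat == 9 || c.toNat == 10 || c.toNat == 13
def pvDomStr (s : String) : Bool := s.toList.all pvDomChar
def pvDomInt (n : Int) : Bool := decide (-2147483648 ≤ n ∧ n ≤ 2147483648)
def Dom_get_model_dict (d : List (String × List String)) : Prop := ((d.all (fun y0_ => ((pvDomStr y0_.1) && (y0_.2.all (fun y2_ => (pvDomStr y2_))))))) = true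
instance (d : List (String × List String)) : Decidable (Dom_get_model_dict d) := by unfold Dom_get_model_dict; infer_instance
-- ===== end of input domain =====

-- B drops A's whole-dict key scan and staged pop-list for three direct conditional pops;
-- equivalence of the RETURN value is proved (both Pythons also mutate d in place identically).

-- ===== PORT A =====
-- pop = []; for key in d.keys(): if not d[key] and key in ['query','body','data']: pop.append(key)
-- then: for i in pop: d.pop(i); return d.  ('not d[key]' on a list value is emptiness; d[key]
-- cannot raise since key comes from d.keys(), so the .getD [] default is never used.)
def get_model_dict (d : List (String × List String)) : List (String × List String) :=
  let dd := PySem.Dict.mk d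
  let pop : List String :=
    (PySem.Dict.keys dd).foldl
      (fun acc key =>
        if ((PySem.Dict.get? dd key).getD []) = [] ∧ key ∈ ["query", "body", "data"] then
          acc ++ [key]
        else acc) []
  (pop.foldl (fun t i => PySem.Dict.erase t i) dd).items

-- ===== PORT B =====
-- for name in ('query','body','data'): if name in d and not d[name]: d.pop(name); return d
def get_model_dict_alt (d : List (String × List String)) : List (String × List String) :=
  (["query", "body", "data"].foldl
      (fun t name =>
        if PySem.Dict.contains t name = true ∧ (PySem.Dict.get? t name).getD [] = [] then
          PySem.Dict.erase t name
        else t)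
      (PySem.Dict.mk d)).items

-- ===== PRECONDITION & SPEC =====
def Spec_get_model_dict (d : List (String × List String)) (out : List (String × List String)) : Prop := out = get_model_dict_alt d
instance (d : List (String × List String)) (out : List (String × List String)) : Decidable (Spec_get_model_dict d out) := by unfold Spec_get_model_dict; infer_instance

-- ===== CLAIM (what is proved, stated in full; the proofs are below) =====
def Claim_equal_get_model_dict : Prop := ∀ (d : List (String × List String)), Dom_get_model_dict d → Spec_get_model_dict d (get_model_dict d)

-- ===== LEMMAS AND PROOFS =====

-- B's conditional-pop step, named for the proofs (definitionally the body of get_model_dict_alt's fold)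
def pvStep (t : PySem.Dict String (List String)) (name : String) : PySem.Dict String (List String) :=
  if PySem.Dict.contains t name = true ∧ (PySem.Dict.get? t name).getD [] = [] then
    PySem.Dict.erase t name
  else t

-- fold of erases = one filter by non-membership in the popped list
theorem foldl_erase_items (pop : List String) (t : PySem.Dict String (List String)) :
    (pop.foldl (fun t i => PySem.Dict.erase t i) t).items
      = t.items.filter (fun p => decide (p.1 ∉ pop)) := by
  induction pop generalizing t with
  | nil => simp
  | cons i rest ih =>
      rw [List.foldl_cons, ih, PySem.Dict.erase, List.filter_filter]
      apply List.filter_congr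
      intro p _
      by_cases h : p.1 = i <;> simp [h]

theorem find?_filter_of_imp (l : List (String × List String))
    (p q : String × List String → Bool) (h : ∀ x, p x = true → q x = true) :
    (l.filter q).find? p = l.find? p := by
  induction l with
  | nil => simp
  | cons a t ih =>
      by_cases hp : p a = true
      · have hq' := h a hp
        simp [hq', hp]
      · have hp' : p a = false := by simpa using hp
        cases hq : q a <;> simp [hq, hp', ih]

theorem get?_pvStep_of_ne (t : PySem.Dict String (List String)) (n m : String) (h : m ≠ n) :
    PySem.Dict.get? (pvStep t n) m = PySem.Dict.get? t m := by
  unfold pvStep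
  split_ifs with hc
  · simp only [PySem.Dict.get?, PySem.Dict.erase]
    rw [find?_filter_of_imp]
    intro x hx
    simp only [beq_iff_eq] at hx
    simp [hx, h]
  · rfl

theorem pvStep_items (t : PySem.Dict String (List String)) (name : String) :
    (pvStep t name).items
      = t.items.filter
          (fun p => !(p.1 == name && decide ((PySem.Dict.get? t name).getD [] = []))) := by
  unfold pvStep
  split_ifs with h
  · obtain ⟨-, h2⟩ := h
    simp [PySem.Dict.erase, h2]
  · rw [Classical.not_and_iff_not_or_not] at h
    rcases h with h | h
    · simp only [Bool.not_eq_true] at h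
      symm
      apply List.filter_eq_self.mpr
      intro p hp
      have : (p.1 == name) = false := by
        cases hb : p.1 == name
        · rfl
        · have hc : PySem.Dict.contains t name = true := by
            show t.items.any (fun q => q.1 == name) = true
            exact List.any_eq_true.mpr ⟨p, hp, hb⟩
          rw [h] at hc
          exact absurd hc (by simp)
      simp [this]
    · have : decide ((PySem.Dict.get? t name).getD [] = []) = false := by simpa using h
      simp [this]

-- ===== VERDICT (by name: the statement is the Claim_ definition above) =====
theorem get_model_dict_spec : Claim_equal_get_model_dict := by
  intro d _
  unfold Spec_get_model_dict get_model_dict get_model_dict_alt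
  dsimp only
  set dd := PySem.Dict.mk d with hdd
  -- A side: the append-if fold is a filter of the keys
  have hfold :
      (PySem.Dict.keys dd).foldl
        (fun acc key =>
          if ((PySem.Dict.get? dd key).getD []) = [] ∧ key ∈ ["query", "body", "data"] then
            acc ++ [key]
          else acc) []
        = (PySem.Dict.keys dd).filter
            (fun key => decide (((PySem.Dict.get? dd key).getD []) = []
                                 ∧ key ∈ ["query", "body", "data"])) := by
    have hf :
        (fun (acc : List String) key =>
            if ((PySem.Dict.get? dd key).getD []) = [] ∧ key ∈ ["query", "body", "data"] then
              acc ++ [key]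
            else acc)
          = (fun acc key =>
              if (decide (((PySem.Dict.get? dd key).getD []) = []
                           ∧ key ∈ ["query", "body", "data"])) = true then
                acc ++ [id key]
              else acc) := by
      funext acc key
      split_ifs with h h' <;> first | rfl | (exfalso; simp_all)
    rw [hf, PySem.List.foldl_append_if, List.map_id]
    simp
  rw [hfold, foldl_erase_items]
  -- B side: three conditional pops, each a filter over the original dict
  show _ = (pvStep (pvStep (pvStep dd "query") "body") "data").items
  have g2 : PySem.Dict.get? (pvStep dd "query") "body" = PySem.Dict.get? dd "body" :=
    get?_pvStep_of_ne _ _ _ (by decide)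
  have g3 : PySem.Dict.get? (pvStep (pvStep dd "query") "body") "data"
      = PySem.Dict.get? dd "data" := by
    rw [get?_pvStep_of_ne _ _ _ (by decide), get?_pvStep_of_ne _ _ _ (by decide)]
  rw [pvStep_items, g3, pvStep_items, g2, pvStep_items, List.filter_filter, List.filter_filter]
  apply List.filter_congr
  intro p hp
  have hkey : p.1 ∈ PySem.Dict.keys dd := List.mem_map_of_mem hp
  by_cases h1 : p.1 = "query"
  · simp [h1, List.mem_filter, show "query" ∈ PySem.Dict.keys dd from h1 ▸ hkey]
  · by_cases h2 : p.1 = "body"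
    · simp [h2, List.mem_filter, show "body" ∈ PySem.Dict.keys dd from h2 ▸ hkey]
    · by_cases h3 : p.1 = "data"
      · simp [h3, List.mem_filter, show "data" ∈ PySem.Dict.keys dd from h3 ▸ hkey]
      · simp [h1, h2, h3, List.mem_filter]
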